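-- pv_equiv track=rewrite | github.com/Mingyang-Li/COMPSCI130 | Lab02.py | get_tag_tuple_list
-- ===== SOURCE A (Python) =====
-- def get_tag_tuple_list(tag_dict, sentence):
--     word_list = sorted(set(sentence.lower().split(" ")))
--     list_of_tp = []
--     for word in word_list:
--         for key in tag_dict:
--             if word in tag_dict[key]:
--                 list_of_tp.append((word, key))
--     return list_of_tp
-- ===== SOURCE B (Python) =====
-- def get_tag_tuple_list(tag_dict, sentence):
--     # reverse index restricted to the sentence's words: one set intersection
--     # per tag instead of one list scan per (word, tag) pair
--     words = set(sentence.lower().split(" "))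
--     inv = {}
--     for key in tag_dict:
--         for w in words.intersection(tag_dict[key]):
--             inv.setdefault(w, []).append(key)
--     out = []
--     for word in sorted(words):
--         out.extend((word, k) for k in inv.get(word, []))
--     return out
-- ===== Notes on version B (the rewrite author's own statement) =====
-- stated objective: alternative
-- what changed: Instead of scanning every tag's whole word list once per sorted sentence word, B builds a reverse index word->tags in one pass over tag_dict using one set intersection per tag, then emits pairs by dictionary lookup per sorted word; fewer membership scans, but the measured wall-clock is on par with A.
import Mathlib
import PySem

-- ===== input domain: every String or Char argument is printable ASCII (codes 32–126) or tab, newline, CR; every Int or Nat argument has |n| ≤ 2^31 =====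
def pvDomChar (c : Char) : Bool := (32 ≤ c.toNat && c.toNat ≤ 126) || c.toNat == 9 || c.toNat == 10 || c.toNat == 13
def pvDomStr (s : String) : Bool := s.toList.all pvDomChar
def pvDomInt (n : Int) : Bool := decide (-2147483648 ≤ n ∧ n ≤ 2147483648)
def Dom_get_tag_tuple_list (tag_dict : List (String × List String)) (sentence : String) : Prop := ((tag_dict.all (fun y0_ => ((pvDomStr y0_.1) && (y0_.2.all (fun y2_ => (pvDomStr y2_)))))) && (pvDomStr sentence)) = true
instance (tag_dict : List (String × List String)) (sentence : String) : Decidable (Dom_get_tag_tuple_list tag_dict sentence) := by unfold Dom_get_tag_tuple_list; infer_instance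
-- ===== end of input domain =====

-- B replaces A's per-(word, tag) list scans by a reverse index (sentence word -> tags) built
-- in one pass over tag_dict with one set intersection per tag; same return value.

-- ===== PORT A =====
-- tag_dict is a Python dict: the association list is materialised as a PySem.Dict
-- (duplicate keys overwrite in place, exactly as dict(...) does); 'for key in tag_dict'
-- iterates its keys and 'tag_dict[key]' is the lookup (getD; never missing for key ∈ keys).
def get_tag_tuple_list (tag_dict : List (String × List String)) (sentence : String) : List (String × String) :=
  let d := PySem.Dict.ofList tag_dict
  -- sep " " is non-empty, so split? is some; sorted(set(..)) via PySem.Set/sorted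
  let word_list := PySem.List.sorted (PySem.Set.ofList ((PySem.Str.split? (PySem.Str.lower sentence) " ").getD [])) (fun x => x) false
  word_list.foldl (fun list_of_tp word =>
    d.keys.foldl (fun list_of_tp key =>
      if word ∈ d.getD key [] then list_of_tp ++ [(word, key)] else list_of_tp) list_of_tp) []

-- ===== PORT B =====
-- words.intersection(tag_dict[key]) is a set B only consumes order-insensitively
-- (each w updates its own inv entry); ported as PySem.Set.inter (the words set's order).
-- inv.setdefault(w, []).append(key)  =  modify w [] (· ++ [key]).
def get_tag_tuple_list_alt (tag_dict : List (String × List String)) (sentence : String) : List (String × String) :=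
  let d := PySem.Dict.ofList tag_dict
  let words := PySem.Set.ofList ((PySem.Str.split? (PySem.Str.lower sentence) " ").getD [])
  let inv := d.keys.foldl (fun inv key =>
    (PySem.Set.inter words (d.getD key [])).foldl (fun inv w => inv.modify w [] (fun l => l ++ [key])) inv)
    PySem.Dict.empty
  (PySem.List.sorted words (fun x => x) false).foldl (fun out word =>
    out ++ (inv.getD word []).map (fun k => (word, k))) []

-- ===== PRECONDITION & SPEC =====
def Spec_get_tag_tuple_list (tag_dict : List (String × List String)) (sentence : String) (out : List (String × String)) : Prop := out = get_tag_tuple_list_alt tag_dict sentence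
instance (tag_dict : List (String × List String)) (sentence : String) (out : List (String × String)) : Decidable (Spec_get_tag_tuple_list tag_dict sentence out) := by unfold Spec_get_tag_tuple_list; infer_instance

-- ===== CLAIM (what is proved, stated in full; the proofs are below) =====
def Claim_equal_get_tag_tuple_list : Prop := ∀ (tag_dict : List (String × List String)) (sentence : String), Dom_get_tag_tuple_list tag_dict sentence → Spec_get_tag_tuple_list tag_dict sentence (get_tag_tuple_list tag_dict sentence)

-- ===== LEMMAS AND PROOFS =====

-- on a Nodup list, filtering for equality with w keeps exactly one w (or none)
lemma filter_beq_of_nodup (l : List String) (hnd : l.Nodup) (w : String) :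
    l.filter (fun x => x == w) = if w ∈ l then [w] else [] := by
  induction l with
  | nil => simp
  | cons a t ih =>
    rcases List.nodup_cons.mp hnd with ⟨ha, ht⟩
    by_cases hw : a = w
    · subst hw
      simp [ih ht, ha]
    · simp [hw, ih ht, Ne.symm hw]

-- the reverse-index build: after folding a selection sel kv of each entry's words
-- (Nodup per entry), inv.getD word [] lists the keys (in order) whose selection has word
lemma inv_getD (sel : String × List String → List String) (hsel : ∀ kv, (sel kv).Nodup)
    (l : List (String × List String)) (d : PySem.Dict String (List String)) (word : String) :
    (l.foldl (fun inv kv =>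
        (sel kv).foldl (fun inv w => inv.modify w [] (fun acc => acc ++ [kv.1])) inv) d).getD word []
      = d.getD word [] ++ (l.filter (fun kv => decide (word ∈ sel kv))).map (fun kv => kv.1) := by
  induction l generalizing d with
  | nil => simp
  | cons kv t ih =>
    rw [List.foldl_cons, ih]
    have hinner : (sel kv).foldl (fun inv w => inv.modify w [] (fun acc => acc ++ [kv.1])) d
        = ((sel kv).map (fun w => (w, kv.1))).foldl (fun inv p => inv.modify p.1 [] (fun acc => acc ++ [p.2])) d := by
      rw [List.foldl_map]
    rw [hinner, PySem.Dict.getD_foldl_modify_append]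
    have hfm : ((sel kv).map (fun w => (w, kv.1))).filter (fun p => p.1 == word)
        = ((sel kv).filter (fun w => w == word)).map (fun w => (w, kv.1)) := by
      rw [List.filter_map]; rfl
    rw [hfm, filter_beq_of_nodup _ (hsel kv) word]
    by_cases hmem : word ∈ sel kv
    · simp [hmem]
    · simp [hmem]

-- iterating a dict's keys and looking each one up is iterating its items
lemma keys_foldl_getD {β : Type} (d : PySem.Dict String (List String)) (hnd : d.keys.Nodup)
    (f : β → String → List String → β) (init : β) :
    d.keys.foldl (fun acc key => f acc key (d.getD key [])) init
      = d.items.foldl (fun acc kv => f acc kv.1 kv.2) init := by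
  have hk : d.keys = d.items.map (fun kv => kv.1) := rfl
  rw [hk, List.foldl_map]
  refine PySem.List.foldl_congr_mem _ _ _ _ ?_
  intro acc kv hkv
  rw [PySem.Dict.getD_of_mem_items d ((Prod.mk.eta (p := kv)) ▸ hkv) hnd]

-- ===== VERDICT (by name: the statement is the Claim_ definition above) =====
theorem get_tag_tuple_list_spec : Claim_equal_get_tag_tuple_list := by
  intro tag_dict sentence _
  unfold Spec_get_tag_tuple_list get_tag_tuple_list get_tag_tuple_list_alt
  set d := PySem.Dict.ofList tag_dict with hd
  have hnd : d.keys.Nodup := PySem.Dict.nodup_keys_ofList tag_dict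
  set words := PySem.Set.ofList ((PySem.Str.split? (PySem.Str.lower sentence) " ").getD []) with hwords
  have hinv : (d.keys.foldl (fun inv key =>
        (PySem.Set.inter words (d.getD key [])).foldl (fun inv w => inv.modify w [] (fun l => l ++ [key])) inv)
        PySem.Dict.empty)
      = d.items.foldl (fun inv kv =>
        (PySem.Set.inter words kv.2).foldl (fun inv w => inv.modify w [] (fun l => l ++ [kv.1])) inv)
        PySem.Dict.empty :=
    keys_foldl_getD (β := PySem.Dict String (List String)) d hnd
      (fun inv key ws => (PySem.Set.inter words ws).foldl (fun inv w => inv.modify w [] (fun l => l ++ [key])) inv)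
      PySem.Dict.empty
  refine PySem.List.foldl_congr_mem _ _ _ _ ?_
  intro acc word hword
  have hword' : word ∈ words := (PySem.List.mem_sorted _ _ _ _).mp hword
  rw [keys_foldl_getD d hnd (fun acc key ws => if word ∈ ws then acc ++ [(word, key)] else acc) acc,
      hinv,
      inv_getD (fun kv => PySem.Set.inter words kv.2)
        (fun kv => (PySem.Set.nodup_ofList _).filter _) d.items PySem.Dict.empty word,
      PySem.Dict.getD_empty]
  have hfilter : d.items.filter (fun kv => decide (word ∈ PySem.Set.inter words kv.2))
      = d.items.filter (fun kv => decide (word ∈ kv.2)) := by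
    refine List.filter_congr ?_
    intro kv _
    simp [PySem.Set.mem_inter, hword']
  rw [hfilter]
  have hfe := PySem.List.foldl_append_if (fun kv => decide (word ∈ kv.2)) (fun kv => (word, kv.1)) d.items acc
  simp only [decide_eq_true_eq] at hfe
  rw [hfe]
  simp [List.map_map, Function.comp_def]
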